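-- pv_equiv track=rewrite | github.com/FitzDegenhub/UltimateCameraMod | linux/ucm.py | strip_header_comments
-- ===== SOURCE A (Python) =====
-- def strip_header_comments(xml_text: str) -> str:
--     result: list[str] = []
--     in_comment = False
--     header_done = False
--     for line in xml_text.split("\n"):
--         stripped = line.strip()
--         if header_done:
--             result.append(line)
--             continue
--         if "<!--" in stripped and "-->" not in stripped:
--             in_comment = True
--             continue
--         if in_comment:
--             if "-->" in stripped:
--                 in_comment = False
--             continue
--         if stripped.startswith("<!--") and stripped.endswith("-->"):
--             continue
--         if not stripped:
--             continue
--         header_done = True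
--         result.append(line)
--     return "\n".join(result)
-- ===== SOURCE B (Python) =====
-- def strip_header_comments(xml_text: str) -> str:
--     # Find the index of the first content line, then slice+join, instead of
--     # building the result incrementally with a header_done state machine.
--     lines = xml_text.split("\n")
--     i = 0
--     in_comment = False
--     while i < len(lines):
--         s = lines[i].strip()
--         if "<!--" in s and "-->" not in s:
--             in_comment = True
--         elif in_comment:
--             if "-->" in s:
--                 in_comment = False
--         elif s and not (s.startswith("<!--") and s.endswith("-->")):
--             break
--         i += 1
--     return "\n".join(lines[i:])
-- ===== Notes on version B (the rewrite author's own statement) =====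
-- stated objective: simpler
-- what changed: B finds the index of the first content line with a small scan (tracking only the in_comment flag) and returns the join of the slice lines[i:], instead of A's incremental result-building state machine with a header_done flag.
import Mathlib
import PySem

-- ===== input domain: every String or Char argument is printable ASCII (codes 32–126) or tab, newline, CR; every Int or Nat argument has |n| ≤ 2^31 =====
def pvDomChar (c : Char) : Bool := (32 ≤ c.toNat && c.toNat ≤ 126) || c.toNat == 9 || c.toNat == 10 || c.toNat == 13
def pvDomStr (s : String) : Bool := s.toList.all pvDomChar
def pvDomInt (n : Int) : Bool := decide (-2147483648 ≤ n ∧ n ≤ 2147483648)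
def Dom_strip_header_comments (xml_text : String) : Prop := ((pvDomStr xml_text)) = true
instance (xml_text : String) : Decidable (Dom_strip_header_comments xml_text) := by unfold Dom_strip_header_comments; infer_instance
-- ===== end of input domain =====

-- B replaces A's incremental result-building state machine (header_done flag) by a
-- boundary-finding scan returning the suffix of lines from the first content line; simpler decomposition.

-- ===== PORT A =====
def stripStepA (st : List String × Bool × Bool) (line : String) : List String × Bool × Bool :=
  let stripped := PySem.Str.strip line
  if st.2.2 then (st.1 ++ [line], st.2.1, st.2.2)
  else if PySem.Str.isIn "<!--" stripped && !(PySem.Str.isIn "-->" stripped) then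
    (st.1, true, st.2.2)
  else if st.2.1 then
    (st.1, if PySem.Str.isIn "-->" stripped then false else st.2.1, st.2.2)
  else if PySem.Str.startswith stripped "<!--" && PySem.Str.endswith stripped "-->" then st
  else if stripped == "" then st
  else (st.1 ++ [line], st.2.1, true)

def strip_header_comments (xml_text : String) : String :=
  PySem.Str.join "\n" (((PySem.Str.split? xml_text "\n").getD []).foldl stripStepA ([], false, false)).1

-- ===== PORT B =====
-- B's while loop: consume header lines carrying only the in_comment flag; the
-- suffix left at the break point is lines[i:].
def skipHeaderB : List String → Bool → List String
  | [], _ => []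
  | line :: rest, ic =>
    let s := PySem.Str.strip line
    if PySem.Str.isIn "<!--" s && !(PySem.Str.isIn "-->" s) then skipHeaderB rest true
    else if ic then skipHeaderB rest (if PySem.Str.isIn "-->" s then false else ic)
    else if s != "" && !(PySem.Str.startswith s "<!--" && PySem.Str.endswith s "-->") then
      line :: rest
    else skipHeaderB rest ic

def strip_header_comments_alt (xml_text : String) : String :=
  PySem.Str.join "\n" (skipHeaderB ((PySem.Str.split? xml_text "\n").getD []) false)

-- ===== PRECONDITION & SPEC =====
def Spec_strip_header_comments (xml_text : String) (out : String) : Prop := out = strip_header_comments_alt xml_text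
instance (xml_text : String) (out : String) : Decidable (Spec_strip_header_comments xml_text out) := by unfold Spec_strip_header_comments; infer_instance

-- ===== CLAIM (what is proved, stated in full; the proofs are below) =====
def Claim_equal_strip_header_comments : Prop := ∀ (xml_text : String), Dom_strip_header_comments xml_text → Spec_strip_header_comments xml_text (strip_header_comments xml_text)

-- ===== LEMMAS AND PROOFS =====
theorem foldl_done (lines : List String) (res : List String) (ic : Bool) :
    lines.foldl stripStepA (res, ic, true) = (res ++ lines, ic, true) := by
  induction lines generalizing res ic with
  | nil => simp
  | cons l t ih => simp [stripStepA, ih]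

theorem foldl_not_done (lines : List String) (res : List String) (ic : Bool) :
    (lines.foldl stripStepA (res, ic, false)).1 = res ++ skipHeaderB lines ic := by
  induction lines generalizing res ic with
  | nil => simp [skipHeaderB]
  | cons l t ih =>
    by_cases h1 : PySem.Chars.isIn ['<', '!', '-', '-'] (PySem.Chars.strip l.toList) = true ∧
        PySem.Chars.isIn ['-', '-', '>'] (PySem.Chars.strip l.toList) = false
    · simp [List.foldl_cons, stripStepA, skipHeaderB, h1, ih]
    · by_cases h2 : ic = true
      · simp [List.foldl_cons, stripStepA, skipHeaderB, h1, h2, ih]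
      · by_cases h3 : PySem.Chars.startswith (PySem.Chars.strip l.toList) ['<', '!', '-', '-'] = true ∧
            PySem.Chars.endswith (PySem.Chars.strip l.toList) ['-', '-', '>'] = true
        · simp [List.foldl_cons, stripStepA, skipHeaderB, h1, h2, h3.1, h3.2, ih]
        · by_cases h4 : PySem.Str.strip l = ""
          · have he : PySem.Chars.isIn ['<', '!', '-', '-'] ([] : List Char) = false := by decide
            simp [List.foldl_cons, stripStepA, skipHeaderB, h2, h4, he, ih]
          · simp [List.foldl_cons, stripStepA, skipHeaderB, h1, h2, h3, h4, foldl_done]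

-- ===== VERDICT (by name: the statement is the Claim_ definition above) =====
theorem strip_header_comments_spec : Claim_equal_strip_header_comments := by
  intro xml_text _
  unfold Spec_strip_header_comments strip_header_comments strip_header_comments_alt
  rw [foldl_not_done]
  simp
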